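-- pv_equiv track=rewrite | github.com/aesuli/token_and_separator | token_and_separator.py | to_token_and_separator
-- ===== SOURCE A (Python) =====
-- def get_tag(annotation):
--     '''
--     Given an annotation ('O', 'I-tag_name', 'B-tag_name') returns 'O' or the tag name with the prefix removed
--     '''
--     if annotation == 'O':
--         return annotation
--     elif annotation.startswith('B-') or annotation.startswith('I-'):
--         return annotation[2:]
--     else:
--         raise ValueError(f'Unknown annotation value: {annotation}')
--
-- def get_type(annotation):
--     '''
--     Given an annotation ('O', 'I-tag_name', 'B-tag_name') returns 'O' or the type of tag, i.e., "B" or "I"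
--     '''
--     if annotation == 'O':
--         return annotation
--     elif annotation.startswith('B-'):
--         return 'B'
--     elif annotation.startswith('I-'):
--         return 'I'
--     else:
--         raise ValueError(f'Unknown annotation type: {annotation}')
--
-- def to_token_and_separator(annotation):
--     '''
--     Converts an IOB/IOB2 annotation to the token and separator model.
--     Once converted, the resulting lists from gold and predicted annotations can be compared using any evaluation measure.
--     @param annotation the sequence of annotation of tokens in IOB/IOB2 format
--     @return the list of tags assigned to each token and separator
--     '''
--
--     token_and_separator_annotation = list()
--     prev_token_tag = None
--     for token_annotation in annotation:
--         token_tag = get_tag(token_annotation)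
--
--         # if not at the first token, then consider the separator between the two tokens
--         if prev_token_tag is not None:
--             # determine the separator tag value by comparing the current and previous tag
--             separator_tag = 'O'
--             if token_tag != 'O':
--                 if token_tag == prev_token_tag and get_type(token_annotation) != 'B':
--                     separator_tag = token_tag
--
--             token_and_separator_annotation.append(separator_tag)
--
--         token_and_separator_annotation.append(token_tag)
--
--         # update the previous token tag to determine the next separator tag
--         prev_token_tag = token_tag
--
--     return token_and_separator_annotation
-- ===== SOURCE B (Python) =====
-- def get_tag(annotation):
--     if annotation == 'O':
--         return annotation
--     elif annotation.startswith('B-') or annotation.startswith('I-'):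
--         return annotation[2:]
--     else:
--         raise ValueError(f'Unknown annotation value: {annotation}')
--
-- def get_type(annotation):
--     if annotation == 'O':
--         return annotation
--     elif annotation.startswith('B-'):
--         return 'B'
--     elif annotation.startswith('I-'):
--         return 'I'
--     else:
--         raise ValueError(f'Unknown annotation type: {annotation}')
--
-- def to_token_and_separator(annotation):
--     # Stage 1: run-length encode the sequence into maximal continuation chains,
--     # each run stored as [tag, length]; a token extends the current run iff its
--     # tag is non-'O', equals the run's tag, and it is not a 'B' (chunk start).
--     runs = []
--     for a in annotation:
--         tag = get_tag(a)
--         if runs and tag != 'O' and tag == runs[-1][0] and get_type(a) != 'B':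
--             runs[-1][1] += 1
--         else:
--             runs.append([tag, 1])
--     # Stage 2: a run of length k expands arithmetically to 2*k-1 copies of its
--     # tag (token, inner separators, ...); distinct runs are joined by an 'O'
--     # separator.
--     out = []
--     for tag, k in runs:
--         if out:
--             out.append('O')
--         out.extend([tag] * (2 * k - 1))
--     return out
-- ===== Notes on version B (the rewrite author's own statement) =====
-- stated objective: alternative
-- what changed: Replaces A's single stateful interleaving loop (prev_token_tag threaded, emitting separator+tag per token) by a two-stage run-length algorithm: first run-length encode the sequence into maximal continuation chains as (tag, length) runs, then expand each run arithmetically to 2k-1 copies of its tag and join runs with 'O' separators.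
import Mathlib
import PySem

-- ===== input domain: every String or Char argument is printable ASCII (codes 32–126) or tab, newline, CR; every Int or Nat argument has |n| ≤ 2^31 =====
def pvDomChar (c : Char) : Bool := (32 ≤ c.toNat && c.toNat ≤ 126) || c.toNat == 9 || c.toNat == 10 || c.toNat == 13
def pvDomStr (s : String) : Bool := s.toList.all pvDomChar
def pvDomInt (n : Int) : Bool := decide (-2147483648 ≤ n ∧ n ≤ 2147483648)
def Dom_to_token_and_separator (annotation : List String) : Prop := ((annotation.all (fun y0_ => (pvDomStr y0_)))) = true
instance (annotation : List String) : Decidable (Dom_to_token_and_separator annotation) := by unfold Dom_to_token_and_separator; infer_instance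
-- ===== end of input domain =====

-- B replaces A's single stateful interleaving loop by a two-stage run-length
-- algorithm (encode maximal continuation chains as (tag, length) runs, then
-- expand each run to 2k-1 copies joined by 'O'); objective: alternative, same cost.

-- ===== PORT A =====
-- get_tag: returns none where Python raises ValueError (excluded by Pre_)
def getTag? (a : String) : Option String :=
  if a = "O" then some a
  else if PySem.Str.startswith a "B-" || PySem.Str.startswith a "I-" then
    some (PySem.Str.slice a (some 2) none)   -- annotation[2:]
  else none

-- get_type: returns none where Python raises ValueError
def getType? (a : String) : Option String :=
  if a = "O" then some a
  else if PySem.Str.startswith a "B-" then some "B"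
  else if PySem.Str.startswith a "I-" then some "I"
  else none

-- A's for-loop with state (prev_token_tag, accumulated list); on a ValueError
-- (none from getTag?) the input is outside Pre_ and the loop just stops.
def pvLoopA : List String → Option String → List String → List String
  | [], _, acc => acc
  | t :: rest, prev, acc =>
    match getTag? t with
    | none => acc
    | some tag =>
      let acc1 :=
        match prev with
        | none => acc
        | some p =>
          let sep := if tag ≠ "O" then
                       (if tag = p ∧ getType? t ≠ some "B" then tag else "O")
                     else "O"
          acc ++ [sep]
      pvLoopA rest (some tag) (acc1 ++ [tag])

def to_token_and_separator (annotation : List String) : List String :=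
  pvLoopA annotation none []

-- ===== PORT B =====
-- Stage 1 of Source B: run-length encode continuation chains; the runs list is kept
-- newest-first (Source B appends at the end and mutates runs[-1]).
def pvRunsB : List String → List (String × Nat) → List (String × Nat)
  | [], runs => runs
  | a :: rest, runs =>
    match getTag? a with
    | none => runs   -- ValueError: outside Pre_
    | some tag =>
      match runs with
      | (t, k) :: more =>
        if tag ≠ "O" ∧ tag = t ∧ getType? a ≠ some "B" then
          pvRunsB rest ((t, k + 1) :: more)
        else
          pvRunsB rest ((tag, 1) :: (t, k) :: more)
      | [] => pvRunsB rest [(tag, 1)]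

-- Stage 2 of Source B: expand each run to 2*k-1 copies of its tag, joining runs with 'O'
def pvExpandB : List String → List (String × Nat) → List String
  | out, [] => out
  | out, (t, k) :: rest =>
      pvExpandB ((if out = [] then out else out ++ ["O"]) ++ List.replicate (2 * k - 1) t) rest

def to_token_and_separator_alt (annotation : List String) : List String :=
  pvExpandB [] ((pvRunsB annotation []).reverse)

-- ===== PRECONDITION & SPEC =====
-- Source A raises ValueError on any element that is neither 'O' nor 'B-'/'I-'-prefixed;
-- Pre_ excludes exactly those inputs (Source B raises the same error there).
def ValidAnn (a : String) : Prop :=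
  a = "O" ∨ PySem.Str.startswith a "B-" = true ∨ PySem.Str.startswith a "I-" = true

def Pre_to_token_and_separator (annotation : List String) : Prop :=
  ∀ a ∈ annotation, ValidAnn a
instance (annotation : List String) : Decidable (Pre_to_token_and_separator annotation) := by
  unfold Pre_to_token_and_separator; unfold ValidAnn; infer_instance

def pvWitness_to_token_and_separator : List String := ["B-x", "I-x", "O", "B-x"]

def Spec_to_token_and_separator (annotation : List String) (out : List String) : Prop := out = to_token_and_separator_alt annotation
instance (annotation : List String) (out : List String) : Decidable (Spec_to_token_and_separator annotation out) := by unfold Spec_to_token_and_separator; infer_instance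

-- ===== CLAIM (what is proved, stated in full; the proofs are below) =====
def Claim_equal_to_token_and_separator : Prop := ∀ (annotation : List String), Dom_to_token_and_separator annotation → Pre_to_token_and_separator annotation → Spec_to_token_and_separator annotation (to_token_and_separator annotation)

-- ===== LEMMAS AND PROOFS =====

def tagOf (a : String) : String := (getTag? a).getD ""

theorem pvBL : "B-".toList = ['B', '-'] := rfl
theorem pvIL : "I-".toList = ['I', '-'] := rfl

theorem getTag?_valid {a : String} (h : ValidAnn a) : getTag? a = some (tagOf a) := by
  unfold ValidAnn at h
  simp only [PySem.Str.startswith_eq, pvBL, pvIL] at h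
  rcases h with h | h | h
  · subst h; rfl
  · by_cases hO : a = "O" <;> simp [getTag?, tagOf, h, hO]
  · by_cases hO : a = "O" <;> simp [getTag?, tagOf, h, hO]

-- rendering a run list (in order): head run is 2k-1 tags, each later run adds 'O' then 2k-1 tags
def pvJ (l : List (String × Nat)) : List String :=
  l.flatMap (fun p => "O" :: List.replicate (2 * p.2 - 1) p.1)

def pvR : List (String × Nat) → List String
  | [] => []
  | (t, k) :: r => List.replicate (2 * k - 1) t ++ pvJ r

theorem expandB_ne (l : List (String × Nat)) (out : List String) (h : out ≠ []) :
    pvExpandB out l = out ++ pvJ l := by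
  induction l generalizing out with
  | nil => simp [pvExpandB, pvJ]
  | cons p r ih =>
    obtain ⟨t, k⟩ := p
    have h2 : out ++ ["O"] ++ List.replicate (2 * k - 1) t ≠ [] := by simp
    simp only [pvExpandB, if_neg h, ih _ h2, pvJ, List.flatMap_cons]
    simp

theorem expandB_eq_R (l : List (String × Nat)) (hpos : ∀ p ∈ l, 1 ≤ p.2) :
    pvExpandB [] l = pvR l := by
  cases l with
  | nil => rfl
  | cons p r =>
    obtain ⟨t, k⟩ := p
    have hk : 1 ≤ k := hpos (t, k) (by simp)
    have hne : List.replicate (2 * k - 1) t ≠ [] := by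
      apply List.ne_nil_of_length_pos
      simp; omega
    have h1 : pvExpandB [] ((t, k) :: r) = pvExpandB (List.replicate (2 * k - 1) t) r := by
      simp [pvExpandB]
    rw [h1, expandB_ne r _ hne]
    rfl

theorem runsB_pos (l : List String) (runs : List (String × Nat))
    (h : ∀ p ∈ runs, 1 ≤ p.2) : ∀ p ∈ pvRunsB l runs, 1 ≤ p.2 := by
  induction l generalizing runs with
  | nil => simpa [pvRunsB] using h
  | cons a rest ih =>
    cases hg : getTag? a with
    | none => simpa [pvRunsB, hg] using h
    | some tag =>
      cases runs with
      | nil =>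
        simp only [pvRunsB, hg]
        exact ih _ (by simp)
      | cons p more =>
        obtain ⟨t, k⟩ := p
        by_cases hc : tag ≠ "O" ∧ tag = t ∧ getType? a ≠ some "B"
        · simp only [pvRunsB, hg, if_pos hc]
          refine ih _ ?_
          intro q hq
          rcases List.mem_cons.mp hq with h1 | h1
          · subst h1; simp
          · exact h q (by simp [h1])
        · simp only [pvRunsB, hg, if_neg hc]
          refine ih _ ?_
          intro q hq
          rcases List.mem_cons.mp hq with h1 | h1
          · subst h1; simp
          · exact h q h1

theorem repSplit (t : String) (k : Nat) (hk : 1 ≤ k) :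
    List.replicate (2 * (k + 1) - 1) t = List.replicate (2 * k - 1) t ++ [t, t] := by
  have : 2 * (k + 1) - 1 = (2 * k - 1) + 2 := by omega
  rw [this, List.replicate_add]
  rfl

theorem R_incr (xs : List (String × Nat)) (t : String) (k : Nat) (hk : 1 ≤ k) :
    pvR (xs ++ [(t, k + 1)]) = pvR (xs ++ [(t, k)]) ++ [t, t] := by
  cases xs with
  | nil => simp [pvR, pvJ, repSplit t k hk]
  | cons p r =>
    obtain ⟨tx, kx⟩ := p
    simp [pvR, pvJ, repSplit t k hk]

theorem R_push (xs : List (String × Nat)) (tag : String) (hne : xs ≠ []) :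
    pvR (xs ++ [(tag, 1)]) = pvR xs ++ ["O", tag] := by
  cases xs with
  | nil => exact absurd rfl hne
  | cons p r =>
    obtain ⟨tx, kx⟩ := p
    simp [pvR, pvJ]

theorem loopA_acc (l : List String) (p : String) (acc : List String) :
    pvLoopA l (some p) acc = acc ++ pvLoopA l (some p) [] := by
  induction l generalizing p acc with
  | nil => simp [pvLoopA]
  | cons a rest ih =>
    simp only [pvLoopA]
    cases getTag? a with
    | none => simp
    | some tag =>
      simp only []
      rw [ih tag, ih tag (([] ++ _) ++ [tag])]
      simp

-- A's separator expression equals the single run-continuation condition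
theorem sepA_eq (a tag p : String) :
    (if tag ≠ "O" then (if tag = p ∧ getType? a ≠ some "B" then tag else "O") else "O")
      = (if tag ≠ "O" ∧ tag = p ∧ getType? a ≠ some "B" then tag else "O") := by
  by_cases h1 : tag = "O" <;> by_cases h2 : tag = p ∧ getType? a ≠ some "B" <;> simp [h1, h2]

theorem runs_main (l : List String) (hv : ∀ a ∈ l, ValidAnn a)
    (t : String) (k : Nat) (runs : List (String × Nat)) (hk : 1 ≤ k) :
    pvR ((pvRunsB l ((t, k) :: runs)).reverse)
      = pvR (((t, k) :: runs).reverse) ++ pvLoopA l (some t) [] := by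
  induction l generalizing t k runs with
  | nil => simp [pvRunsB, pvLoopA]
  | cons a rest ih =>
    have ha : ValidAnn a := hv a (by simp)
    have hrest : ∀ x ∈ rest, ValidAnn x := fun x hx => hv x (by simp [hx])
    have hg := getTag?_valid ha
    set tag := tagOf a with htag
    have hA : pvLoopA (a :: rest) (some t) []
        = [(if tag ≠ "O" ∧ tag = t ∧ getType? a ≠ some "B" then tag else "O"), tag]
            ++ pvLoopA rest (some tag) [] := by
      simp only [pvLoopA, hg]
      rw [loopA_acc]
      simp [sepA_eq a tag t]
    by_cases hc : tag ≠ "O" ∧ tag = t ∧ getType? a ≠ some "B"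
    · have hB : pvRunsB (a :: rest) ((t, k) :: runs)
          = pvRunsB rest ((t, k + 1) :: runs) := by
        simp only [pvRunsB, hg]; rw [if_pos hc]
      rw [hB, ih hrest t (k + 1) runs (by omega), hA, if_pos hc]
      have : pvR (((t, k + 1) :: runs).reverse) = pvR (((t, k) :: runs).reverse) ++ [t, t] := by
        simp only [List.reverse_cons]
        exact R_incr runs.reverse t k hk
      rw [this]
      rcases hc with ⟨_, hct, _⟩
      simp [hct]
    · have hB : pvRunsB (a :: rest) ((t, k) :: runs)
          = pvRunsB rest ((tag, 1) :: (t, k) :: runs) := by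
        simp only [pvRunsB, hg]; rw [if_neg hc]
      rw [hB, ih hrest tag 1 ((t, k) :: runs) (by omega), hA, if_neg hc]
      have : pvR (((tag, 1) :: (t, k) :: runs).reverse)
          = pvR (((t, k) :: runs).reverse) ++ ["O", tag] := by
        simp only [List.reverse_cons]
        exact R_push (runs.reverse ++ [(t, k)]) tag (by simp)
      rw [this]
      simp

-- ===== VERDICT (by name: the statement is the Claim_ definition above) =====
theorem to_token_and_separator_spec : Claim_equal_to_token_and_separator := by
  intro annotation _ hPre
  unfold Spec_to_token_and_separator
  cases annotation with
  | nil => rfl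
  | cons a rest =>
    have ha : ValidAnn a := hPre a (by simp)
    have hrest : ∀ x ∈ rest, ValidAnn x := fun x hx => hPre x (by simp [hx])
    have hg := getTag?_valid ha
    have hA : to_token_and_separator (a :: rest)
        = [tagOf a] ++ pvLoopA rest (some (tagOf a)) [] := by
      simp only [to_token_and_separator, pvLoopA, hg]
      rw [loopA_acc]
      simp
    have hB : to_token_and_separator_alt (a :: rest)
        = pvR ((pvRunsB rest [(tagOf a, 1)]).reverse) := by
      have hpos : ∀ p ∈ pvRunsB rest [(tagOf a, 1)], 1 ≤ p.2 :=
        runsB_pos rest [(tagOf a, 1)] (by simp)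
      simp only [to_token_and_separator_alt, pvRunsB, hg]
      exact expandB_eq_R _ (by intro p hp; exact hpos p (by simpa using hp))
    rw [hA, hB, runs_main rest hrest (tagOf a) 1 [] (by omega)]
    simp [pvR, pvJ]
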